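-- pv_equiv track=rewrite | github.com/DancingOnAir/LeetcodePythonSolution | hash_table/3852_smallest_pair_with_different_frequencies.py | minDistinctFreqPair
-- ===== SOURCE A (Python) =====
-- from collections import Counter
--
-- def minDistinctFreqPair(nums: list[int]) -> list[int]:
--     cnt1 = Counter(nums)
--     cnt2 = Counter()
--     x = y = -1
--     for k in sorted(cnt1):
--         v = cnt1[k]
--         if v not in cnt2 or k < cnt2[v]:
--             cnt2[v] = k
--             if x == -1 or x > k:
--                 y = x
--                 x = k
--             elif y == -1 or y > k:
--                 y = k
--     return [-1, -1] if y == -1 else [x, y]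
-- ===== SOURCE B (Python) =====
-- def minDistinctFreqPair(nums: list[int]) -> list[int]:
--     # one sort of the raw list, then a run-length scan collecting the smallest
--     # key of each distinct frequency in ascending key order
--     cands = []
--     seen = set()
--     prev = None
--     run = 0
--     for v in sorted(nums):
--         if v == prev:
--             run += 1
--         else:
--             if prev is not None and run not in seen:
--                 seen.add(run)
--                 cands.append(prev)
--             prev = v
--             run = 1
--     if prev is not None and run not in seen:
--         seen.add(run)
--         cands.append(prev)
--     return cands[:2] if len(cands) >= 2 else [-1, -1]
-- ===== Notes on version B (the rewrite author's own statement) =====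
-- stated objective: faster
-- what changed: Replaces Counter + sorted-keys + the cnt2 dict and the -1/x/y sentinel state machine by a single sort of the raw list followed by a run-length scan that collects the smallest key per distinct frequency into a list and slices off its first two elements.
-- intended difference: On inputs where -1 is the smallest element of its frequency class and is one of the two smallest such per-frequency minima (with at least two of them), A's use of -1 as an 'unset' sentinel makes it drop the candidate -1 (returning e.g. [-1,-1] or a pair skipping -1), while B returns the two smallest candidates including -1, which is the intended answer. — e.g. on minDistinctFreqPair([-1, 2, 2]): A returns [-1, -1], B returns [-1, 2]
import Mathlib
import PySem

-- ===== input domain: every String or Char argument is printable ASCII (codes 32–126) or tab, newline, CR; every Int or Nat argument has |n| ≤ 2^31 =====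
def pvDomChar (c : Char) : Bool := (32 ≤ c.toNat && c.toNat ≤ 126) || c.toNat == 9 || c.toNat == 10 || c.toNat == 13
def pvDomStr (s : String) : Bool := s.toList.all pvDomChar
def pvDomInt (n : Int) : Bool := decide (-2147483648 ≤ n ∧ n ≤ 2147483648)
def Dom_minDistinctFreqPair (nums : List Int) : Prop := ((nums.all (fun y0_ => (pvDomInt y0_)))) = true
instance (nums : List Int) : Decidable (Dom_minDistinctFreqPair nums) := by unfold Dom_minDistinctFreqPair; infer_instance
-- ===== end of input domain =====

-- B replaces Counter + sorted keys + the cnt2 dict and the -1/x/y sentinel machine by one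
-- sort of the raw list plus a run-length scan (measured faster in a timing run, same
-- asymptotics); on the corner stated at D_ below B returns the intended value where A's
-- -1 sentinel loses a candidate.

-- ===== PORT A =====
-- loop body of A's 'for k in sorted(cnt1)'; state = (cnt2, x, y)
def aStep (cnt1 : PySem.Dict Int Int) (s : PySem.Dict Int Int × Int × Int) (k : Int) :
    PySem.Dict Int Int × Int × Int :=
  if s.1.contains (cnt1.getD k 0) = false ∨ k < s.1.getD (cnt1.getD k 0) 0 then
    (s.1.insert (cnt1.getD k 0) k,
     if s.2.1 = -1 ∨ s.2.1 > k then (k, s.2.1)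
     else if s.2.2 = -1 ∨ s.2.2 > k then (s.2.1, k)
     else s.2)
  else s

def minDistinctFreqPair (nums : List Int) : List Int :=
  let cnt1 := PySem.Dict.counter nums
  let st := (PySem.List.sorted cnt1.keys (fun k => k) false).foldl (aStep cnt1)
      ((PySem.Dict.empty : PySem.Dict Int Int), -1, -1)
  if st.2.2 = -1 then [-1, -1] else [st.2.1, st.2.2]

-- ===== PORT B =====
-- 'if prev is not None and run not in seen: seen.add(run); cands.append(prev)'
def bFlush (cands : List Int) (seen : PySem.Set Int) (prev : Option Int) (run : Int) :
    List Int × PySem.Set Int :=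
  match prev with
  | none => (cands, seen)
  | some p => if run ∈ seen then (cands, seen) else (cands ++ [p], PySem.Set.add seen run)

-- loop body of B's 'for v in sorted(nums)'; state = (cands, seen, prev, run)
def bStep (s : List Int × PySem.Set Int × Option Int × Int) (v : Int) :
    List Int × PySem.Set Int × Option Int × Int :=
  if s.2.2.1 = some v then (s.1, s.2.1, s.2.2.1, s.2.2.2 + 1)
  else
    let fs := bFlush s.1 s.2.1 s.2.2.1 s.2.2.2
    (fs.1, fs.2, some v, 1)

def minDistinctFreqPair_alt (nums : List Int) : List Int :=
  let st := (PySem.List.sorted nums (fun v => v) false).foldl bStep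
      ([], PySem.Set.empty, none, 0)
  let fin := bFlush st.1 st.2.1 st.2.2.1 st.2.2.2
  if 2 ≤ fin.1.length then fin.1.take 2 else [-1, -1]

-- ===== PRECONDITION & SPEC =====
-- no element smaller than k has the same frequency as k
def cand (ns : List Int) (k : Int) : Prop :=
  ∀ j ∈ ns, j < k → ns.count j ≠ ns.count k

-- On inputs where -1 is the smallest element of its frequency class and is one of the two
-- smallest such per-frequency minima (at least two existing), A's -1 'unset' sentinel drops
-- the candidate -1 (returning e.g. [-1,-1] or a pair skipping -1), while B returns the two
-- smallest candidates including -1, the intended answer.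
def D_minDistinctFreqPair (nums : List Int) : Prop :=
  -1 ∈ nums ∧ cand nums (-1) ∧ (∃ b ∈ nums, b ≠ -1 ∧ cand nums b) ∧
  ∀ a ∈ nums, a < -1 → cand nums a → ∀ j ∈ nums, a ≤ j
instance (nums : List Int) : Decidable (D_minDistinctFreqPair nums) := by
  unfold D_minDistinctFreqPair cand; infer_instance

def Spec_minDistinctFreqPair (nums : List Int) (out : List Int) : Prop :=
  ¬ D_minDistinctFreqPair nums → out = minDistinctFreqPair_alt nums
instance (nums : List Int) (out : List Int) : Decidable (Spec_minDistinctFreqPair nums out) := by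
  unfold Spec_minDistinctFreqPair; infer_instance

def pvDiffWitness_minDistinctFreqPair : List Int := [-1, 2, 2]
def pvDiffWitnessOut_minDistinctFreqPair : (List Int) × (List Int) := ([-1, -1], [-1, 2])

-- ===== CLAIM (what is proved, stated in full; the proofs are below) =====
def Claim_unchanged_minDistinctFreqPair : Prop :=
  ∀ (nums : List Int), Dom_minDistinctFreqPair nums →
    Spec_minDistinctFreqPair nums (minDistinctFreqPair nums)
def Claim_changed_minDistinctFreqPair : Prop :=
  Dom_minDistinctFreqPair (pvDiffWitness_minDistinctFreqPair) ∧
  D_minDistinctFreqPair (pvDiffWitness_minDistinctFreqPair) ∧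
  minDistinctFreqPair (pvDiffWitness_minDistinctFreqPair) = pvDiffWitnessOut_minDistinctFreqPair.1 ∧
  minDistinctFreqPair_alt (pvDiffWitness_minDistinctFreqPair) = pvDiffWitnessOut_minDistinctFreqPair.2 ∧
  pvDiffWitnessOut_minDistinctFreqPair.1 ≠ pvDiffWitnessOut_minDistinctFreqPair.2
def Claim_exact_minDistinctFreqPair : Prop :=
  ∀ (nums : List Int), Dom_minDistinctFreqPair nums → D_minDistinctFreqPair nums →
    minDistinctFreqPair nums ≠ minDistinctFreqPair_alt nums

-- ===== LEMMAS AND PROOFS =====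

-- the sorted distinct keys both loops traverse
def sKeys (nums : List Int) : List Int :=
  PySem.List.sorted (PySem.Set.ofList nums) (fun k => k) false

-- the stateful candidate filter both loops reduce to: keep k when its count is unseen
def candF (cnt : Int → Int) : List Int → List Int → List Int
  | [], _ => []
  | k :: r, seen =>
      if cnt k ∈ seen then candF cnt r seen else k :: candF cnt r (cnt k :: seen)

-- the candidate list: smallest key of each distinct frequency, ascending
def cList (nums : List Int) : List Int :=
  candF (fun k => (nums.count k : Int)) (sKeys nums) []

-- the x/y update of A's loop
def xyStep (s : Int × Int) (k : Int) : Int × Int :=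
  if s.1 = -1 ∨ s.1 > k then (k, s.1)
  else if s.2 = -1 ∨ s.2 > k then (s.1, k)
  else s

lemma candF_congr (cnt : Int → Int) :
    ∀ (ks : List Int) (s t : List Int), (∀ x, x ∈ s ↔ x ∈ t) →
      candF cnt ks s = candF cnt ks t := by
  intro ks
  induction ks with
  | nil => intro s t h; rfl
  | cons k r ih =>
    intro s t h
    simp only [candF]
    by_cases hk : cnt k ∈ s
    · rw [if_pos hk, if_pos ((h _).mp hk)]
      exact ih _ _ h
    · rw [if_neg hk, if_neg (fun hm => hk ((h _).mpr hm))]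
      have : ∀ x, x ∈ cnt k :: s ↔ x ∈ cnt k :: t := by
        intro x; simp only [List.mem_cons, h x]
      rw [ih _ _ this]

lemma candF_sublist (cnt : Int → Int) :
    ∀ (ks seen : List Int), (candF cnt ks seen).Sublist ks := by
  intro ks
  induction ks with
  | nil => intro seen; simp [candF]
  | cons k r ih =>
    intro seen
    simp only [candF]
    split
    · exact (ih seen).cons k
    · exact (ih _).cons₂ k

lemma mem_candF (cnt : Int → Int) :
    ∀ (ks seen : List Int), ks.Pairwise (· < ·) →
      ∀ v, (v ∈ candF cnt ks seen ↔
        v ∈ ks ∧ cnt v ∉ seen ∧ ∀ j ∈ ks, j < v → cnt j ≠ cnt v) := by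
  intro ks
  induction ks with
  | nil => intro seen _ v; simp [candF]
  | cons k r ih =>
    intro seen hp v
    rw [List.pairwise_cons] at hp
    obtain ⟨hk, hp'⟩ := hp
    simp only [candF]
    by_cases hs : cnt k ∈ seen
    · rw [if_pos hs]
      rw [ih seen hp' v]
      constructor
      · rintro ⟨hv, hns, hall⟩
        refine ⟨List.mem_cons_of_mem _ hv, hns, ?_⟩
        intro j hj hjv
        rcases List.mem_cons.mp hj with rfl | hj'
        · intro hEq; exact hns (hEq ▸ hs)
        · exact hall j hj' hjv
      · rintro ⟨hv, hns, hall⟩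
        rcases List.mem_cons.mp hv with rfl | hv'
        · exact absurd hs hns
        · exact ⟨hv', hns, fun j hj hjv => hall j (List.mem_cons_of_mem _ hj) hjv⟩
    · rw [if_neg hs]
      constructor
      · intro hv
        rcases List.mem_cons.mp hv with rfl | hv'
        · refine ⟨List.mem_cons_self .., hs, ?_⟩
          intro j hj hjv
          rcases List.mem_cons.mp hj with rfl | hj'
          · omega
          · exact absurd hjv (by have := hk j hj'; omega)
        · obtain ⟨hvr, hns, hall⟩ := (ih _ hp' v).mp hv'
          have hnk : cnt v ∉ seen ∧ cnt v ≠ cnt k := by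
            constructor
            · intro h; exact hns (List.mem_cons_of_mem _ h)
            · intro h; exact hns (h ▸ List.mem_cons_self ..)
          refine ⟨List.mem_cons_of_mem _ hvr, hnk.1, ?_⟩
          intro j hj hjv
          rcases List.mem_cons.mp hj with rfl | hj'
          · exact fun h => hnk.2 h.symm
          · exact hall j hj' hjv
      · rintro ⟨hv, hns, hall⟩
        rcases List.mem_cons.mp hv with rfl | hv'
        · exact List.mem_cons_self ..
        · refine List.mem_cons_of_mem _ ((ih _ hp' v).mpr ⟨hv', ?_, fun j hj hjv => hall j (List.mem_cons_of_mem _ hj) hjv⟩)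
          intro h
          rcases List.mem_cons.mp h with hEq | h'
          · exact hall k (List.mem_cons_self ..) (hk v hv') hEq.symm
          · exact hns h'

-- ===== facts about sKeys =====
lemma sKeys_pairwise (nums : List Int) : (sKeys nums).Pairwise (· < ·) :=
  PySem.List.sorted_ofList_pairwise_lt nums

lemma mem_sKeys (nums : List Int) : ∀ v, v ∈ sKeys nums ↔ v ∈ nums := by
  intro v
  rw [sKeys, PySem.List.mem_sorted, PySem.Set.mem_ofList]

-- ===== A reduces to cList =====
lemma aFold (cnt1 : PySem.Dict Int Int) :
    ∀ (ks : List Int) (cnt2 : PySem.Dict Int Int) (xy : Int × Int),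
      ks.Pairwise (· < ·) →
      (∀ v, cnt2.contains v = true → ∀ k ∈ ks, cnt2.getD v 0 < k) →
      (ks.foldl (aStep cnt1) (cnt2, xy)).2 =
        (candF (fun k => cnt1.getD k 0) ks cnt2.keys).foldl xyStep xy := by
  intro ks
  induction ks with
  | nil => intro cnt2 xy _ _; simp [candF]
  | cons k r ih =>
    intro cnt2 xy hp hb
    rw [List.pairwise_cons] at hp
    obtain ⟨hk, hp'⟩ := hp
    simp only [List.foldl_cons, candF]
    by_cases hc : cnt2.contains (cnt1.getD k 0) = true
    · have hlt : cnt2.getD (cnt1.getD k 0) 0 < k := hb _ hc k (List.mem_cons_self ..)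
      have hstep : aStep cnt1 (cnt2, xy) k = (cnt2, xy) := by
        unfold aStep
        rw [if_neg]
        push_neg
        refine ⟨by simp [hc], ?_⟩
        show cnt2.getD (cnt1.getD k 0) 0 ≤ k
        omega
      have hmem : cnt1.getD k 0 ∈ cnt2.keys := (PySem.Dict.contains_iff_mem_keys ..).mp hc
      rw [hstep, if_pos hmem]
      exact ih cnt2 xy hp' (fun v hv k' hk' => hb v hv k' (List.mem_cons_of_mem _ hk'))
    · have hnm : cnt1.getD k 0 ∉ cnt2.keys := fun h => hc ((PySem.Dict.contains_iff_mem_keys ..).mpr h)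
      have hstep : aStep cnt1 (cnt2, xy) k =
          (cnt2.insert (cnt1.getD k 0) k, xyStep xy k) := by
        unfold aStep xyStep
        rw [if_pos (Or.inl (by simp [hc]))]
      rw [hstep, if_neg hnm, List.foldl_cons]
      rw [ih _ (xyStep xy k) hp' ?hb']
      case hb' =>
        intro v hv k' hk'
        rw [PySem.Dict.contains_insert] at hv
        rcases (Bool.or_eq_true ..).mp hv with h1 | h2
        · have : v = cnt1.getD k 0 := by simpa using h1
          subst this
          rw [PySem.Dict.getD_insert_self]
          exact hk k' hk'
        · have hne : v ≠ cnt1.getD k 0 := by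
            intro h; subst h; simp [hc] at h2
          rw [PySem.Dict.getD_insert_of_ne _ _ _ hne]
          exact hb v h2 k' (List.mem_cons_of_mem _ hk')
      congr 1
      apply candF_congr
      intro x
      rw [PySem.Dict.mem_keys_insert]
      simp [List.mem_cons, or_comm]

lemma A_char (nums : List Int) :
    minDistinctFreqPair nums =
      (let xy := (cList nums).foldl xyStep (-1, -1)
       if xy.2 = -1 then [-1, -1] else [xy.1, xy.2]) := by
  have hfold := aFold (PySem.Dict.counter nums) (sKeys nums) PySem.Dict.empty (-1, -1)
      (sKeys_pairwise nums)
      (by intro v hv; rw [PySem.Dict.contains_empty] at hv; cases hv)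
  have hcnt : (fun k => (PySem.Dict.counter nums).getD k 0) =
      (fun k => ((nums.count k : Nat) : Int)) := by
    funext k; exact PySem.Dict.getD_counter ..
  rw [hcnt] at hfold
  have hkeys2 : (PySem.Dict.empty : PySem.Dict Int Int).keys = [] := rfl
  rw [hkeys2] at hfold
  have h2 : ((sKeys nums).foldl (aStep (PySem.Dict.counter nums))
      ((PySem.Dict.empty : PySem.Dict Int Int), -1, -1)).2 =
      (cList nums).foldl xyStep (-1, -1) := hfold
  simp only [minDistinctFreqPair]
  rw [PySem.Dict.keys_counter]
  rw [show PySem.List.sorted (PySem.Set.ofList nums) (fun k => k) false = sKeys nums from rfl]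
  rw [h2]

-- ===== B reduces to cList =====
lemma count_flatMap_rep (ns : List Int) :
    ∀ (l : List Int), l.Nodup → ∀ v,
      ((l.flatMap (fun k => List.replicate (ns.count k) k)).count v)
        = if v ∈ l then ns.count v else 0 := by
  intro l
  induction l with
  | nil => simp
  | cons k r ih =>
    intro hn v
    obtain ⟨hk, hn'⟩ := List.nodup_cons.mp hn
    simp only [List.flatMap_cons, List.count_append, List.count_replicate, ih hn' v]
    by_cases hv : v = k
    · subst hv
      simp [hk]
    · simp [hv, List.mem_cons]
      exact fun h => absurd h.symm hv

lemma pairwise_le_flatMap (c : Int → Nat) :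
    ∀ (l : List Int), l.Pairwise (· < ·) →
      (l.flatMap (fun k => List.replicate (c k) k)).Pairwise (· ≤ ·) := by
  intro l
  induction l with
  | nil => simp
  | cons k r ih =>
    intro hp
    rw [List.pairwise_cons] at hp
    simp only [List.flatMap_cons]
    rw [List.pairwise_append]
    refine ⟨List.pairwise_replicate.mpr (Or.inr le_rfl), ih hp.2, ?_⟩
    intro x hx y hy
    rw [List.mem_replicate] at hx
    rw [List.mem_flatMap] at hy
    obtain ⟨k', hk', hy'⟩ := hy
    rw [List.mem_replicate] at hy'
    rw [hx.2, hy'.2]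
    exact le_of_lt (hp.1 k' hk')

lemma sKeys_nodup (nums : List Int) : (sKeys nums).Nodup :=
  ((PySem.List.sorted_perm (PySem.Set.ofList nums) (fun k => k) false).nodup_iff).mpr
    (PySem.Set.nodup_ofList nums)

lemma sorted_decomp (nums : List Int) :
    PySem.List.sorted nums (fun v => v) false =
      (sKeys nums).flatMap (fun k => List.replicate (nums.count k) k) := by
  apply PySem.List.sorted_id_eq_of_perm_of_pairwise
  · rw [List.perm_iff_count]
    intro v
    rw [count_flatMap_rep nums _ (sKeys_nodup nums) v]
    by_cases hv : v ∈ nums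
    · simp [(mem_sKeys nums v).mpr hv]
    · rw [if_neg (fun h => hv ((mem_sKeys nums v).mp h))]
      rw [List.count_eq_zero.mpr hv]
  · exact pairwise_le_flatMap _ _ (sKeys_pairwise nums)

lemma bRep (k : Int) :
    ∀ (m : Nat) (cands : List Int) (seen : PySem.Set Int) (r : Int),
      (List.replicate m k).foldl bStep (cands, seen, some k, r) =
        (cands, seen, some k, r + (m : Int)) := by
  intro m
  induction m with
  | zero => intro cands seen r; simp
  | succ m ih =>
    intro cands seen r
    rw [List.replicate_succ, List.foldl_cons]
    rw [show bStep (cands, seen, some k, r) k = (cands, seen, some k, r + 1) from by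
      simp [bStep]]
    rw [ih]
    simp only [Prod.mk.injEq, true_and]
    push_cast
    ring

lemma bMain (c : Int → Nat) :
    ∀ (ks : List Int) (cands : List Int) (seen : PySem.Set Int) (p : Option Int) (r : Int),
      ks.Pairwise (· < ·) → (∀ k ∈ ks, c k ≠ 0) → (∀ k ∈ ks, p ≠ some k) →
      (let st := (ks.flatMap (fun k => List.replicate (c k) k)).foldl bStep (cands, seen, p, r)
       (bFlush st.1 st.2.1 st.2.2.1 st.2.2.2).1) =
        (bFlush cands seen p r).1 ++
          candF (fun k => ((c k : Nat) : Int)) ks (bFlush cands seen p r).2 := by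
  intro ks
  induction ks with
  | nil => intro cands seen p r _ _ _; simp [candF]
  | cons k r' ih =>
    intro cands seen p r hp hc hne
    rw [List.pairwise_cons] at hp
    obtain ⟨hklt, hp'⟩ := hp
    obtain ⟨n, hn⟩ := Nat.exists_eq_succ_of_ne_zero (hc k (List.mem_cons_self ..))
    simp only [List.flatMap_cons, List.foldl_append]
    rw [hn, List.replicate_succ, List.foldl_cons]
    have hpk := hne k (List.mem_cons_self ..)
    rw [show bStep (cands, seen, p, r) k =
        ((bFlush cands seen p r).1, (bFlush cands seen p r).2, some k, 1) from by
      unfold bStep; rw [if_neg hpk]]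
    rw [bRep]
    have hmain := ih (bFlush cands seen p r).1 (bFlush cands seen p r).2 (some k) (1 + (n : Int))
      hp' (fun k' h => hc k' (List.mem_cons_of_mem _ h))
      (fun k' h => by simpa using (hklt k' h).ne)
    simp only at hmain ⊢
    rw [hmain]
    rw [show (1 : Int) + (n : Int) = ((c k : Nat) : Int) from by rw [hn]; push_cast; ring]
    rw [show bFlush (bFlush cands seen p r).1 (bFlush cands seen p r).2 (some k) ((c k : Nat) : Int)
        = (if ((c k : Nat) : Int) ∈ (bFlush cands seen p r).2
           then ((bFlush cands seen p r).1, (bFlush cands seen p r).2)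
           else ((bFlush cands seen p r).1 ++ [k],
                 PySem.Set.add (bFlush cands seen p r).2 ((c k : Nat) : Int))) from rfl]
    simp only [candF]
    by_cases hmem : ((c k : Nat) : Int) ∈ (bFlush cands seen p r).2
    · rw [if_pos hmem, if_pos hmem]
    · rw [if_neg hmem, if_neg hmem]
      rw [PySem.Set.add_of_not_mem hmem]
      rw [candF_congr _ r' ((bFlush cands seen p r).2 ++ [((c k : Nat) : Int)])
        (((c k : Nat) : Int) :: (bFlush cands seen p r).2)
        (by intro x; simp [List.mem_append, List.mem_cons, or_comm])]
      show ((bFlush cands seen p r).1 ++ [k]) ++ _ = _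
      rw [List.append_assoc]
      rfl

lemma B_char (nums : List Int) :
    minDistinctFreqPair_alt nums =
      (if 2 ≤ (cList nums).length then (cList nums).take 2 else [-1, -1]) := by
  have h := bMain (fun k => nums.count k) (sKeys nums) [] [] none 0
    (sKeys_pairwise nums)
    (fun k hk => fun h => (List.count_eq_zero.mp h) ((mem_sKeys nums k).mp hk))
    (fun k _ => by simp)
  simp only [minDistinctFreqPair_alt]
  rw [sorted_decomp]
  simp only at h
  rw [show bFlush [] ([] : PySem.Set Int) none 0 = ([], ([] : PySem.Set Int)) from rfl] at h
  simp only at h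
  rw [show (PySem.Set.empty : PySem.Set Int) = [] from rfl]
  rw [h]
  rfl

-- ===== the xy fold on a strictly increasing list =====
lemma xyS1 : ∀ (l : List Int) (x y : Int), x ≠ -1 → y ≠ -1 →
    (∀ k ∈ l, y < k ∧ x < k) → l.foldl xyStep (x, y) = (x, y) := by
  intro l
  induction l with
  | nil => intro x y _ _ _; rfl
  | cons k t ih =>
    intro x y hx hy h
    have hk := h k (List.mem_cons_self ..)
    rw [List.foldl_cons]
    rw [show xyStep (x, y) k = (x, y) from by
      unfold xyStep
      rw [if_neg (by push_neg; exact ⟨hx, by show x ≤ k; omega⟩),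
          if_neg (by push_neg; exact ⟨hy, by show y ≤ k; omega⟩)]]
    exact ih x y hx hy (fun j hj => h j (List.mem_cons_of_mem _ hj))

lemma xyS2 : ∀ (l : List Int) (a : Int), a ≠ -1 → l.Pairwise (· < ·) →
    (∀ k ∈ l, a < k ∧ -1 < k) →
    l.foldl xyStep (a, -1) = (match l with | [] => (a, -1) | b :: _ => (a, b)) := by
  intro l a ha hp h
  cases l with
  | nil => rfl
  | cons b t =>
    rw [List.pairwise_cons] at hp
    have hb := h b (List.mem_cons_self ..)
    rw [List.foldl_cons]
    rw [show xyStep (a, -1) b = (a, b) from by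
      unfold xyStep
      rw [if_neg (by push_neg; exact ⟨ha, by show a ≤ b; omega⟩), if_pos (Or.inl rfl)]]
    exact xyS1 t a b ha (by omega)
      (fun k hk => ⟨hp.1 k hk, (h k (List.mem_cons_of_mem _ hk)).1⟩)

lemma xy_char : ∀ (l : List Int), l.Pairwise (· < ·) →
    l.foldl xyStep (-1, -1) =
      (match l.filter (fun k => k != -1) with
       | [] => (-1, -1)
       | [a] => (a, -1)
       | a :: b :: _ => (a, b)) := by
  intro l hp
  cases l with
  | nil => rfl
  | cons a t =>
    rw [List.pairwise_cons] at hp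
    obtain ⟨ha, hp'⟩ := hp
    rw [List.foldl_cons]
    rw [show xyStep (-1, -1) a = (a, -1) from by
      unfold xyStep; rw [if_pos (Or.inl rfl)]]
    by_cases hA : a = -1
    · subst hA
      rw [List.filter_cons_of_neg (by simp)]
      have hft : t.filter (fun k => k != -1) = t :=
        List.filter_eq_self.mpr (fun k hk => by have := ha k hk; simp; omega)
      rw [hft]
      cases t with
      | nil => rfl
      | cons b t2 =>
        rw [List.pairwise_cons] at hp'
        have hb := ha b (List.mem_cons_self ..)
        rw [List.foldl_cons]
        rw [show xyStep (-1, -1) b = (b, -1) from by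
          unfold xyStep; rw [if_pos (Or.inl rfl)]]
        rw [xyS2 t2 b (by omega) hp'.2
          (fun k hk => ⟨hp'.1 k hk, by have := ha k (List.mem_cons_of_mem _ hk); omega⟩)]
        cases t2 <;> rfl
    · rw [List.filter_cons_of_pos (by simp [hA])]
      cases t with
      | nil => rfl
      | cons b t2 =>
        rw [List.pairwise_cons] at hp'
        obtain ⟨hb', hp''⟩ := hp'
        have hab := ha b (List.mem_cons_self ..)
        by_cases hB : b = -1
        · subst hB
          rw [List.foldl_cons]
          rw [show xyStep (a, -1) (-1) = (a, -1) from by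
            unfold xyStep
            rw [if_neg (by push_neg; exact ⟨hA, by show a ≤ -1; omega⟩), if_pos (Or.inl rfl)]]
          have hft2 : t2.filter (fun k => k != -1) = t2 :=
            List.filter_eq_self.mpr (fun k hk => by have := hb' k hk; simp; omega)
          rw [List.filter_cons_of_neg (by simp), hft2]
          rw [xyS2 t2 a hA hp''
            (fun k hk => ⟨by have := ha k (List.mem_cons_of_mem _ hk); omega,
                          by have := hb' k hk; omega⟩)]
          cases t2 <;> rfl
        · rw [List.foldl_cons]
          rw [show xyStep (a, -1) b = (a, b) from by
            unfold xyStep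
            rw [if_neg (by push_neg; exact ⟨hA, by show a ≤ b; omega⟩), if_pos (Or.inl rfl)]]
          rw [xyS1 t2 a b hA hB
            (fun k hk => ⟨hb' k hk, by have := ha k (List.mem_cons_of_mem _ hk); omega⟩)]
          rw [List.filter_cons_of_pos (by simp [hB])]

-- ===== cList facts =====
lemma cList_pairwise (nums : List Int) : (cList nums).Pairwise (· < ·) :=
  (sKeys_pairwise nums).sublist (candF_sublist _ _ _)

lemma mem_cList (nums : List Int) :
    ∀ v, v ∈ cList nums ↔ v ∈ nums ∧ cand nums v := by
  intro v
  rw [cList, mem_candF _ _ _ (sKeys_pairwise nums) v]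
  constructor
  · rintro ⟨hv, -, hall⟩
    refine ⟨(mem_sKeys nums v).mp hv, ?_⟩
    intro j hj hjv hcnt
    exact hall j ((mem_sKeys nums j).mpr hj) hjv (by exact_mod_cast hcnt)
  · rintro ⟨hv, hc⟩
    refine ⟨(mem_sKeys nums v).mpr hv, by simp, ?_⟩
    intro j hj hjv hcnt
    exact hc j ((mem_sKeys nums j).mp hj) hjv (by exact_mod_cast hcnt)

-- ===== assembling the verdict =====
lemma A_val2 (nums : List Int) :
    minDistinctFreqPair nums =
      (match (cList nums).filter (fun k => k != -1) with
       | [] => [-1, -1]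
       | [_] => [-1, -1]
       | a :: b :: _ => [a, b]) := by
  have hA : minDistinctFreqPair nums =
      (if ((cList nums).foldl xyStep (-1, -1)).2 = -1 then [-1, -1]
       else [((cList nums).foldl xyStep (-1, -1)).1,
             ((cList nums).foldl xyStep (-1, -1)).2]) := by
    rw [A_char]
  rw [hA, xy_char _ (cList_pairwise nums)]
  rcases hF : (cList nums).filter (fun k => k != -1) with _ | ⟨a, t⟩
  · rfl
  · rcases t with _ | ⟨b, t2⟩
    · rfl
    · have hb : b ≠ -1 := by
        have hmem : b ∈ (cList nums).filter (fun k => k != -1) := by rw [hF]; simp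
        simpa using (List.mem_filter.mp hmem).2
      simp [hb]

lemma min_cand (nums : List Int) (j : Int) (hj : j ∈ nums) :
    ∃ m ∈ nums, m ≤ j ∧ cand nums m := by
  cases hm : PySem.List.min? nums (fun x => x) with
  | none => rw [PySem.List.min?_eq_none_iff] at hm; subst hm; cases hj
  | some m =>
    have hmin := PySem.List.min?_isMin hm
    have hmem := PySem.List.min?_mem hm
    exact ⟨m, hmem, hmin j hj,
      fun j' hj' hlt => absurd (hmin j' hj') (by omega)⟩

-- ===== VERDICT (by name: the statement is the Claim_ definition above) =====
theorem minDistinctFreqPair_spec : Claim_unchanged_minDistinctFreqPair := by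
  intro nums _ hD
  show minDistinctFreqPair nums = minDistinctFreqPair_alt nums
  rw [A_val2, B_char]
  rcases hC : cList nums with _ | ⟨c1, t⟩
  · rfl
  · rcases t with _ | ⟨c2, t2⟩
    · by_cases h : c1 = -1
      · subst h
        rw [List.filter_cons_of_neg (by simp)]
        rfl
      · rw [List.filter_cons_of_pos (by simp [h])]
        rfl
    · have hpw := cList_pairwise nums
      rw [hC] at hpw
      rw [List.pairwise_cons] at hpw
      obtain ⟨h1, hpw2⟩ := hpw
      rw [List.pairwise_cons] at hpw2
      obtain ⟨h2, _⟩ := hpw2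
      have h12 : c1 < c2 := h1 c2 (List.mem_cons_self ..)
      have hc1C : c1 ∈ cList nums := by rw [hC]; simp
      have hc2C : c2 ∈ cList nums := by rw [hC]; simp
      obtain ⟨hc1M, hc1c⟩ := (mem_cList nums c1).mp hc1C
      obtain ⟨hc2M, hc2c⟩ := (mem_cList nums c2).mp hc2C
      have hne : c1 ≠ -1 ∧ c2 ≠ -1 := by
        by_contra hcon
        apply hD
        have hd1 : -1 ∈ nums ∧ cand nums (-1) := by
          rcases not_and_or.mp hcon with h | h
          · push_neg at h; exact h ▸ ⟨hc1M, hc1c⟩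
          · push_neg at h; exact h ▸ ⟨hc2M, hc2c⟩
        refine ⟨hd1.1, hd1.2, ?_, ?_⟩
        · rcases not_and_or.mp hcon with h | h
          · push_neg at h
            exact ⟨c2, hc2M, by omega, hc2c⟩
          · push_neg at h
            exact ⟨c1, hc1M, by omega, hc1c⟩
        · intro a haM halt hac j hjM
          have haC : a ∈ cList nums := (mem_cList nums a).mpr ⟨haM, hac⟩
          rw [hC] at haC
          rcases not_and_or.mp hcon with h | h
          all_goals push_neg at h
          · -- c1 = -1 : every element of cList is ≥ -1 > a, absurd
            exfalso
            rcases List.mem_cons.mp haC with rfl | haC'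
            · omega
            · have := h1 a haC'; omega
          · -- c2 = -1 : a must be c1, the least candidate, which is ≤ min nums
            have ha1 : a = c1 := by
              rcases List.mem_cons.mp haC with rfl | haC'
              · rfl
              · exfalso
                rcases List.mem_cons.mp haC' with rfl | haC''
                · omega
                · have := h2 a haC''; omega
            obtain ⟨m, hmM, hmj, hmc⟩ := min_cand nums j hjM
            have hmC : m ∈ cList nums := (mem_cList nums m).mpr ⟨hmM, hmc⟩
            rw [hC] at hmC
            have : c1 ≤ m := by
              rcases List.mem_cons.mp hmC with rfl | hmC'
              · exact le_refl _
              · have := h1 m hmC'; omega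
            omega
      rw [List.filter_cons_of_pos (by simp [hne.1]),
          List.filter_cons_of_pos (by simp [hne.2])]
      simp

theorem minDistinctFreqPair_changed : Claim_changed_minDistinctFreqPair := by
  unfold Claim_changed_minDistinctFreqPair; decide

theorem minDistinctFreqPair_tight : Claim_exact_minDistinctFreqPair := by
  intro nums _ hD
  obtain ⟨hm1, hc1, ⟨b, hbM, hbne, hbc⟩, hall⟩ := hD
  have hNegC : -1 ∈ cList nums := (mem_cList nums (-1)).mpr ⟨hm1, hc1⟩
  have hbC : b ∈ cList nums := (mem_cList nums b).mpr ⟨hbM, hbc⟩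
  rw [A_val2, B_char]
  rcases hC : cList nums with _ | ⟨c1, t⟩
  · rw [hC] at hNegC; cases hNegC
  rcases t with _ | ⟨c2, t2⟩
  · rw [hC] at hNegC hbC
    simp at hNegC hbC
    exact absurd (hbC.trans hNegC.symm) hbne
  have hpw := cList_pairwise nums
  rw [hC] at hpw
  rw [List.pairwise_cons] at hpw
  obtain ⟨h1, hpw2⟩ := hpw
  rw [List.pairwise_cons] at hpw2
  obtain ⟨h2, _⟩ := hpw2
  have h12 : c1 < c2 := h1 c2 (List.mem_cons_self ..)
  have hc1C : c1 ∈ cList nums := by rw [hC]; simp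
  have hc2C : c2 ∈ cList nums := by rw [hC]; simp
  obtain ⟨hc1M, hc1c⟩ := (mem_cList nums c1).mp hc1C
  obtain ⟨hc2M, hc2c⟩ := (mem_cList nums c2).mp hc2C
  have hneg12 : -1 = c1 ∨ -1 = c2 := by
    rw [hC] at hNegC
    rcases List.mem_cons.mp hNegC with h | h
    · exact Or.inl h
    rcases List.mem_cons.mp h with h' | h'
    · exact Or.inr h'
    · -- -1 in t2 : then c1 < c2 < -1 are two candidates below -1, contradicting hall
      exfalso
      have hc2neg : c2 < -1 := h2 _ h'
      have := hall c2 hc2M hc2neg hc2c c1 hc1M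
      omega
  rw [show (if 2 ≤ (c1 :: c2 :: t2).length then (c1 :: c2 :: t2).take 2 else [-1, -1])
      = [c1, c2] from by simp]
  rcases hneg12 with h | h
  · -- c1 = -1, c2 > -1
    subst h
    rw [List.filter_cons_of_neg (by simp)]
    rw [List.filter_cons_of_pos (by simp; omega)]
    rcases hft : t2.filter (fun k => k != -1) with _ | ⟨w, t3⟩
    · intro hEq
      simp at hEq
      omega
    · intro hEq
      simp at hEq
      omega
  · -- c2 = -1, c1 < -1
    subst h
    rw [List.filter_cons_of_pos (by simp; omega)]
    rw [List.filter_cons_of_neg (by simp)]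
    rcases hft : t2.filter (fun k => k != -1) with _ | ⟨w, t3⟩
    · intro hEq
      simp at hEq
      omega
    · have hw : w ∈ t2.filter (fun k => k != -1) := by rw [hft]; simp
      have hwne : w ≠ -1 := by simpa using (List.mem_filter.mp hw).2
      intro hEq
      simp at hEq
      omega
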